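-- pv_equiv track=rewrite | github.com/p4u-l/advent-of-code-2021 | day15/day15.py | expand_2d_arr
-- ===== SOURCE A (Python) =====
-- def expand_2d_arr(arr, n=5):
--     expanded = []
--     for y in range(n):
--         for row in arr:
--             new_row = []
--             for x in range(n):
--                 row_seg = map(lambda a: (a-1+x+y)%9+1, row)
--                 new_row += row_seg
--             expanded.append(new_row)
--     return expanded
-- ===== SOURCE B (Python) =====
-- def expand_2d_arr(arr, n=5):
--     base = [[(a - 1 + x) % 9 + 1 for x in range(n) for a in row] for row in arr]
--     return [[(v - 1 + y) % 9 + 1 for v in base_row] for y in range(n) for base_row in base]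
-- ===== Notes on version B (the rewrite author's own statement) =====
-- stated objective: alternative
-- what changed: B precomputes the horizontally-expanded base band once and derives each vertical band by a single wrap-shift map over those expanded rows, instead of A's triple loop recomputing every cell (and rebuilding each row by repeated map+concat) from the original rows.
import Mathlib
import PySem

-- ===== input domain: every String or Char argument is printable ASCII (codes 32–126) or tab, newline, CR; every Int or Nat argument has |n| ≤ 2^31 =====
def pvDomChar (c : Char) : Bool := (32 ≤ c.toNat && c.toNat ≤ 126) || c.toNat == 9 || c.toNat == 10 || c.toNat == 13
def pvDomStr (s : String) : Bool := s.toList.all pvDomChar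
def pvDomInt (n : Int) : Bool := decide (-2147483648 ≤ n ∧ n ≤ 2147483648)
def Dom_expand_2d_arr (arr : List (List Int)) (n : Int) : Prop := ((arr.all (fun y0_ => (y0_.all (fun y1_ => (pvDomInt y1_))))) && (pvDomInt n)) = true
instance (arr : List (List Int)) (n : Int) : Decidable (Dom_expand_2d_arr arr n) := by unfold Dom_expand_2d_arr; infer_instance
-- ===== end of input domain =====

-- B precomputes the horizontally-expanded base rows once and derives each vertical
-- band by a wrap-shift map over them (alternative decomposition; return value only).
-- ===== PORT A =====
def expand_2d_arr (arr : List (List Int)) (n : Int) : List (List Int) :=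
  (PySem.List.pyRange 0 n 1).foldl (fun expanded y =>
    arr.foldl (fun expanded row =>
      expanded ++ [(PySem.List.pyRange 0 n 1).foldl (fun new_row x =>
        new_row ++ row.map (fun a => PySem.Int.mod (a - 1 + x + y) 9 + 1)) []]) expanded) []

-- ===== PORT B =====
def expand_2d_arr_alt (arr : List (List Int)) (n : Int) : List (List Int) :=
  let base := arr.map (fun row =>
    (PySem.List.pyRange 0 n 1).flatMap (fun x =>
      row.map (fun a => PySem.Int.mod (a - 1 + x) 9 + 1)))
  (PySem.List.pyRange 0 n 1).flatMap (fun y =>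
    base.map (fun base_row => base_row.map (fun v => PySem.Int.mod (v - 1 + y) 9 + 1)))

-- ===== PRECONDITION & SPEC =====
def Spec_expand_2d_arr (arr : List (List Int)) (n : Int) (out : List (List Int)) : Prop := out = expand_2d_arr_alt arr n
instance (arr : List (List Int)) (n : Int) (out : List (List Int)) : Decidable (Spec_expand_2d_arr arr n out) := by unfold Spec_expand_2d_arr; infer_instance

-- ===== CLAIM (what is proved, stated in full; the proofs are below) =====
def Claim_equal_expand_2d_arr : Prop := ∀ (arr : List (List Int)) (n : Int), Dom_expand_2d_arr arr n → Spec_expand_2d_arr arr n (expand_2d_arr arr n)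

-- ===== LEMMAS AND PROOFS =====

-- ===== VERDICT (by name: the statement is the Claim_ definition above) =====
-- wrap arithmetic: shifting an already-wrapped value by y wraps the same as shifting before wrapping
lemma wrap_shift (m y : Int) :
    PySem.Int.mod (PySem.Int.mod m 9 + 1 - 1 + y) 9 + 1 = PySem.Int.mod (m + y) 9 + 1 := by
  simp only [PySem.Int.mod_eq_emod_of_pos (by norm_num : (0:Int) < 9)]
  omega

lemma inner_row (row : List Int) (xs : List Int) (y : Int) :
    xs.flatMap (fun x => row.map (fun a => PySem.Int.mod (a - 1 + x + y) 9 + 1)) =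
      (xs.flatMap (fun x => row.map (fun a => PySem.Int.mod (a - 1 + x) 9 + 1))).map
        (fun v => PySem.Int.mod (v - 1 + y) 9 + 1) := by
  rw [List.map_flatMap]
  refine List.flatMap_congr (fun x _ => ?_)
  rw [List.map_map]
  refine List.map_congr_left (fun a _ => ?_)
  simp only [Function.comp]
  simpa using wrap_shift (a - 1 + x) y

theorem expand_2d_arr_spec : Claim_equal_expand_2d_arr := by
  intro arr n _
  unfold Spec_expand_2d_arr expand_2d_arr expand_2d_arr_alt
  simp only [PySem.List.foldl_append_singleton_eq_map, PySem.List.foldl_append_eq_flatMap,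
    List.nil_append]
  refine List.flatMap_congr (fun y _ => ?_)
  rw [List.map_map]
  refine List.map_congr_left (fun row _ => ?_)
  simpa using inner_row row _ y
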